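-- pv_equiv track=rewrite | github.com/YashB63/GFG-Daily-Questions | Day 747/Good or Bad string/good_or_bad_string.py | isGoodorBad
-- ===== SOURCE A (Python) =====
-- def isGoodorBad(S):
--     vow,cons=0,0
--     for i in S:
--         if i in "aeiou":
--             cons=0;vow+=1
--         elif i=="?":
--             vow+=1;cons+=1
--         else:
--             vow=0;cons+=1
--         if vow>5 or cons>3:
--             return 0
--     return 1
-- ===== SOURCE B (Python) =====
-- def isGoodorBad(S):
--     vowels = "aeiou"
--     n = len(S)
--     bad_v = any(all(c in vowels or c == '?' for c in S[i:i+6]) for i in range(n - 5))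
--     bad_c = any(all(c not in vowels for c in S[i:i+4]) for i in range(n - 3))
--     return 0 if bad_v or bad_c else 1
-- ===== Notes on version B (the rewrite author's own statement) =====
-- stated objective: alternative
-- what changed: Replaced A's single pass maintaining two interacting run counters with an early return by direct existential window checks: bad iff some 6-char window is all vowel-or-wildcard chars or some 4-char window is all non-vowel.
import Mathlib
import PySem

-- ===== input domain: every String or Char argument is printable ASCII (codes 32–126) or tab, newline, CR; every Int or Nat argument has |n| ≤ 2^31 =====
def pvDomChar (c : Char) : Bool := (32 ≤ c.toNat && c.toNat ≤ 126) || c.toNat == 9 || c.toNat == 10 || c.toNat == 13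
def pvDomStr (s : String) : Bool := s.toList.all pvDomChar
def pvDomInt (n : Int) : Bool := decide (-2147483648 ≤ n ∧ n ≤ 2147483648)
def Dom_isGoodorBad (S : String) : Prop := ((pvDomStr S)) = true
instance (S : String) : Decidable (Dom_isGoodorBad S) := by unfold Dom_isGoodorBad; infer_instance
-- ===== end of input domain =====

-- B replaces A's two interacting run counters by direct window checks: bad iff some
-- 6-length window is all vowel-or-wildcard or some 4-length window is all non-vowel (simpler/idiomatic; not faster).

-- ===== PORT A =====
-- loop over the characters carrying (vow, cons); early `return 0` becomes returning 0 from the recursion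
def isGoodorBadGo : List Char → Int → Int → Int
  | [], _, _ => 1
  | i :: rest, vow, cons =>
    if ("aeiou".toList).contains i then
      -- cons=0; vow+=1
      let cons : Int := 0
      let vow := vow + 1
      if 5 < vow ∨ 3 < cons then 0 else isGoodorBadGo rest vow cons
    else if i = '?' then
      let vow := vow + 1
      let cons := cons + 1
      if 5 < vow ∨ 3 < cons then 0 else isGoodorBadGo rest vow cons
    else
      let vow : Int := 0
      let cons := cons + 1
      if 5 < vow ∨ 3 < cons then 0 else isGoodorBadGo rest vow cons

def isGoodorBad (S : String) : Int := isGoodorBadGo S.toList 0 0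

-- ===== PORT B =====
-- c in "aeiou" or c == '?'
def vqB (c : Char) : Bool := ("aeiou".toList).contains c || c == '?'
-- c not in "aeiou"
def nvB (c : Char) : Bool := !(("aeiou".toList).contains c)

def isGoodorBad_alt (S : String) : Int :=
  let l := S.toList
  let badV := (List.range (l.length - 5)).any
    (fun i => (PySem.List.slice l (some (i : Int)) (some ((i : Int) + 6))).all vqB)
  let badC := (List.range (l.length - 3)).any
    (fun i => (PySem.List.slice l (some (i : Int)) (some ((i : Int) + 4))).all nvB)
  if badV || badC then 0 else 1

-- ===== PRECONDITION & SPEC =====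
def Spec_isGoodorBad (S : String) (out : Int) : Prop := out = isGoodorBad_alt S
instance (S : String) (out : Int) : Decidable (Spec_isGoodorBad S out) := by unfold Spec_isGoodorBad; infer_instance

-- ===== CLAIM (what is proved, stated in full; the proofs are below) =====
def Claim_equal_isGoodorBad : Prop := ∀ (S : String), Dom_isGoodorBad S → Spec_isGoodorBad S (isGoodorBad S)

-- ===== LEMMAS AND PROOFS =====

-- "some prefix of length k (1 ≤ k ≤ |l|) is all-p and the carried counter x plus k exceeds t"
def Pfx (p : Char → Bool) (t : Int) (l : List Char) (x : Int) : Prop :=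
  ∃ k : ℕ, 1 ≤ k ∧ k ≤ l.length ∧ (l.take k).all p = true ∧ t < x + k

-- "some window of length n inside l is all-p"
def Win (p : Char → Bool) (n : ℕ) (l : List Char) : Prop :=
  ∃ i : ℕ, i + n ≤ l.length ∧ ((l.drop i).take n).all p = true

lemma all_take_mono (p : Char → Bool) (l : List Char) {j k : ℕ} (h : j ≤ k)
    (hk : (l.take k).all p = true) : (l.take j).all p = true := by
  rw [List.all_eq_true] at *
  intro x hx
  exact hk x (by
    have : l.take j = (l.take k).take j := by
      rw [List.take_take, Nat.min_eq_left h]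
    exact List.take_subset j (l.take k) (this ▸ hx))

lemma pfx_cons (p : Char → Bool) (t : Int) (c : Char) (rest : List Char) (x : Int) :
    Pfx p t (c :: rest) x ↔ (p c = true ∧ (t < x + 1 ∨ Pfx p t rest (x + 1))) := by
  constructor
  · rintro ⟨k, hk1, hk2, hall, ht⟩
    obtain ⟨k', rfl⟩ : ∃ k', k = k' + 1 := ⟨k - 1, by omega⟩
    rw [List.take_succ_cons, List.all_cons, Bool.and_eq_true] at hall
    refine ⟨hall.1, ?_⟩
    rcases Nat.eq_zero_or_pos k' with h0 | hpos
    · subst h0; left; simpa using ht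
    · right; exact ⟨k', hpos, by simpa using hk2, hall.2, by push_cast at ht ⊢; omega⟩
  · rintro ⟨hc, h | ⟨k, hk1, hk2, hall, ht⟩⟩
    · exact ⟨1, le_refl _, by simp, by simp [hc], by simpa using h⟩
    · exact ⟨k + 1, by omega, by simpa using Nat.succ_le_succ hk2,
        by rw [List.take_succ_cons, List.all_cons]; simp [hc, hall],
        by push_cast at ht ⊢; omega⟩

lemma pfx_zero (p : Char → Bool) (t : Int) (n : ℕ) (hn : (n : Int) = t + 1) (hn1 : 1 ≤ n)
    (l : List Char) : Pfx p t l 0 ↔ (n ≤ l.length ∧ (l.take n).all p = true) := by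
  constructor
  · rintro ⟨k, hk1, hk2, hall, ht⟩
    have hnk : n ≤ k := by omega
    exact ⟨le_trans hnk hk2, all_take_mono p l hnk hall⟩
  · rintro ⟨hlen, hall⟩
    exact ⟨n, hn1, hlen, hall, by omega⟩

lemma pfx_zero_win (p : Char → Bool) (t : Int) (n : ℕ) (hn : (n : Int) = t + 1) (hn1 : 1 ≤ n)
    (l : List Char) : Pfx p t l 0 → Win p n l := by
  intro h
  obtain ⟨hlen, hall⟩ := (pfx_zero p t n hn hn1 l).mp h
  exact ⟨0, by simpa using hlen, by simpa using hall⟩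

lemma win_cons (p : Char → Bool) (n : ℕ) (hn : 1 ≤ n) (c : Char) (rest : List Char) :
    Win p n (c :: rest) ↔
      ((p c = true ∧ n - 1 ≤ rest.length ∧ (rest.take (n - 1)).all p = true) ∨ Win p n rest) := by
  constructor
  · rintro ⟨i, hi, hall⟩
    rcases i with _ | j
    · left
      obtain ⟨m, rfl⟩ : ∃ m, n = m + 1 := ⟨n - 1, by omega⟩
      rw [List.drop_zero, List.take_succ_cons, List.all_cons, Bool.and_eq_true] at hall
      exact ⟨hall.1, by simpa using hi, by simpa using hall.2⟩
    · right
      refine ⟨j, by simp at hi; omega, by simpa using hall⟩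
  · rintro (⟨hc, hlen, hall⟩ | ⟨i, hi, hall⟩)
    · refine ⟨0, by simp; omega, ?_⟩
      obtain ⟨m, rfl⟩ : ∃ m, n = m + 1 := ⟨n - 1, by omega⟩
      rw [List.drop_zero, List.take_succ_cons, List.all_cons]
      simp_all
    · exact ⟨i + 1, by simp; omega, by simpa using hall⟩

-- head window of rest (length n-1 all-p) gives a qualifying prefix for the bumped counter
lemma headwin_pfx (p : Char → Bool) (t : Int) (n : ℕ) (hn : (n : Int) = t + 1) (hn2 : 2 ≤ n)
    (rest : List Char) (x : Int) (hx : 0 ≤ x)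
    (hlen : n - 1 ≤ rest.length) (hall : (rest.take (n - 1)).all p = true) :
    Pfx p t rest (x + 1) := by
  refine ⟨n - 1, by omega, hlen, hall, ?_⟩
  have : ((n - 1 : ℕ) : Int) = (n : Int) - 1 := by omega
  omega

lemma goA_eq_zero_iff (l : List Char) : ∀ (vow cons : Int), 0 ≤ vow → 0 ≤ cons →
    (isGoodorBadGo l vow cons = 0 ↔
      Pfx vqB 5 l vow ∨ Pfx nvB 3 l cons ∨ Win vqB 6 l ∨ Win nvB 4 l) := by
  induction l with
  | nil =>
    intro vow cons _ _
    simp only [isGoodorBadGo]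
    constructor
    · intro h; exact absurd h (by norm_num)
    · rintro (⟨k, hk1, hk2, _, _⟩ | ⟨k, hk1, hk2, _, _⟩ | ⟨i, hi, _⟩ | ⟨i, hi, _⟩) <;> simp_all
  | cons c rest ih =>
    intro vow cons hv hc
    have hvq6 : ((6 : ℕ) : Int) = 5 + 1 := by norm_num
    have hnv4 : ((4 : ℕ) : Int) = 3 + 1 := by norm_num
    rw [pfx_cons, pfx_cons, win_cons vqB 6 (by norm_num), win_cons nvB 4 (by norm_num)]
    by_cases hcv : ("aeiou".toList).contains c = true
    · -- vowel branch
      have hvqc : vqB c = true := by unfold vqB; rw [hcv]; rfl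
      have hnvc : nvB c = false := by unfold nvB; rw [hcv]; rfl
      rw [show isGoodorBadGo (c :: rest) vow cons
            = (if 5 < vow + 1 ∨ 3 < (0:Int) then 0 else isGoodorBadGo rest (vow + 1) 0) by
          simp only [isGoodorBadGo]; rw [if_pos hcv]]
      have IH := ih (vow + 1) 0 (by omega) (by omega)
      split_ifs with htrip
      · constructor
        · intro _; left; exact ⟨hvqc, Or.inl (by omega)⟩
        · intro _; rfl
      · rw [IH]
        constructor
        · rintro (h | h | h | h)
          · exact Or.inl ⟨hvqc, Or.inr h⟩
          · right; right; right
            exact Or.inr (pfx_zero_win nvB 3 4 hnv4 (by norm_num) rest h)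
          · tauto
          · tauto
        · rintro (⟨_, h1 | h1⟩ | ⟨h1, _⟩ | (⟨_, hlen, hall⟩ | h) | (⟨hpc, _, _⟩ | h))
          · omega
          · tauto
          · rw [hnvc] at h1; exact absurd h1 (by simp)
          · left; exact headwin_pfx vqB 5 6 hvq6 (by norm_num) rest vow hv hlen hall
          · tauto
          · rw [hnvc] at hpc; exact absurd hpc (by simp)
          · tauto
    · by_cases hq : c = '?'
      · -- '?' branch
        have hcv' : ("aeiou".toList).contains c = false := by simpa using hcv
        have hvqc : vqB c = true := by rw [hq]; decide
        have hnvc : nvB c = true := by unfold nvB; rw [hcv']; rfl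
        rw [show isGoodorBadGo (c :: rest) vow cons
              = (if 5 < vow + 1 ∨ 3 < cons + 1 then 0 else isGoodorBadGo rest (vow + 1) (cons + 1)) by
            simp only [isGoodorBadGo]; rw [if_neg (by rw [hcv']; simp), if_pos hq]]
        have IH := ih (vow + 1) (cons + 1) (by omega) (by omega)
        split_ifs with htrip
        · constructor
          · intro _
            rcases htrip with h | h
            · exact Or.inl ⟨hvqc, Or.inl (by omega)⟩
            · exact Or.inr (Or.inl ⟨hnvc, Or.inl (by omega)⟩)
          · intro _; rfl
        · rw [IH]
          constructor
          · rintro (h | h | h | h)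
            · exact Or.inl ⟨hvqc, Or.inr h⟩
            · exact Or.inr (Or.inl ⟨hnvc, Or.inr h⟩)
            · tauto
            · tauto
          · rintro (⟨_, h1 | h1⟩ | ⟨_, h1 | h1⟩ | (⟨_, hlen, hall⟩ | h) | (⟨_, hlen2, hall2⟩ | h))
            · omega
            · tauto
            · omega
            · tauto
            · left; exact headwin_pfx vqB 5 6 hvq6 (by norm_num) rest vow hv hlen hall
            · tauto
            · right; left; exact headwin_pfx nvB 3 4 hnv4 (by norm_num) rest cons hc hlen2 hall2
            · tauto
      · -- other-consonant branch
        have hcv' : ("aeiou".toList).contains c = false := by simpa using hcv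
        have hvqc : vqB c = false := by unfold vqB; rw [hcv']; simp [hq]
        have hnvc : nvB c = true := by unfold nvB; rw [hcv']; rfl
        rw [show isGoodorBadGo (c :: rest) vow cons
              = (if 5 < (0:Int) ∨ 3 < cons + 1 then 0 else isGoodorBadGo rest 0 (cons + 1)) by
            simp only [isGoodorBadGo]; rw [if_neg (by rw [hcv']; simp), if_neg hq]]
        have IH := ih 0 (cons + 1) (by omega) (by omega)
        split_ifs with htrip
        · constructor
          · intro _; exact Or.inr (Or.inl ⟨hnvc, Or.inl (by omega)⟩)
          · intro _; rfl
        · rw [IH]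
          constructor
          · rintro (h | h | h | h)
            · right; right; left
              exact Or.inr (pfx_zero_win vqB 5 6 hvq6 (by norm_num) rest h)
            · exact Or.inr (Or.inl ⟨hnvc, Or.inr h⟩)
            · tauto
            · tauto
          · rintro (⟨h1, _⟩ | ⟨_, h1 | h1⟩ | (⟨hpc, _, _⟩ | h) | (⟨_, hlen, hall⟩ | h))
            · rw [hvqc] at h1; exact absurd h1 (by simp)
            · omega
            · tauto
            · rw [hvqc] at hpc; exact absurd hpc (by simp)
            · tauto
            · right; left; exact headwin_pfx nvB 3 4 hnv4 (by norm_num) rest cons hc hlen hall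
            · tauto

lemma goA_zero_or_one (l : List Char) : ∀ vow cons : Int,
    isGoodorBadGo l vow cons = 0 ∨ isGoodorBadGo l vow cons = 1 := by
  induction l with
  | nil => intro vow cons; right; rfl
  | cons c rest ih =>
    intro vow cons
    simp only [isGoodorBadGo]
    split_ifs <;> first | (left; rfl) | apply ih

lemma badV_iff (l : List Char) :
    ((List.range (l.length - 5)).any
      (fun i => (PySem.List.slice l (some (i : Int)) (some ((i : Int) + 6))).all vqB) = true)
      ↔ Win vqB 6 l := by
  rw [List.any_eq_true]
  constructor
  · rintro ⟨i, hi, hall⟩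
    rw [List.mem_range] at hi
    rw [show ((i : Int) + 6) = ((i : Int) + ((6 : ℕ) : Int)) by norm_num,
      PySem.List.slice_natCast_add] at hall
    exact ⟨i, by omega, hall⟩
  · rintro ⟨i, hi, hall⟩
    refine ⟨i, List.mem_range.mpr (by omega), ?_⟩
    rw [show ((i : Int) + 6) = ((i : Int) + ((6 : ℕ) : Int)) by norm_num,
      PySem.List.slice_natCast_add]
    exact hall

lemma badC_iff (l : List Char) :
    ((List.range (l.length - 3)).any
      (fun i => (PySem.List.slice l (some (i : Int)) (some ((i : Int) + 4))).all nvB) = true)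
      ↔ Win nvB 4 l := by
  rw [List.any_eq_true]
  constructor
  · rintro ⟨i, hi, hall⟩
    rw [List.mem_range] at hi
    rw [show ((i : Int) + 4) = ((i : Int) + ((4 : ℕ) : Int)) by norm_num,
      PySem.List.slice_natCast_add] at hall
    exact ⟨i, by omega, hall⟩
  · rintro ⟨i, hi, hall⟩
    refine ⟨i, List.mem_range.mpr (by omega), ?_⟩
    rw [show ((i : Int) + 4) = ((i : Int) + ((4 : ℕ) : Int)) by norm_num,
      PySem.List.slice_natCast_add]
    exact hall

-- ===== VERDICT (by name: the statement is the Claim_ definition above) =====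
theorem isGoodorBad_spec : Claim_equal_isGoodorBad := by
  intro S _
  unfold Spec_isGoodorBad isGoodorBad isGoodorBad_alt
  set l := S.toList with hl
  simp only []
  have hmain := goA_eq_zero_iff l 0 0 (le_refl 0) (le_refl 0)
  have hwin : isGoodorBadGo l 0 0 = 0 ↔ Win vqB 6 l ∨ Win nvB 4 l := by
    rw [hmain]
    constructor
    · rintro (h | h | h | h)
      · exact Or.inl (pfx_zero_win vqB 5 6 (by norm_num) (by norm_num) l h)
      · exact Or.inr (pfx_zero_win nvB 3 4 (by norm_num) (by norm_num) l h)
      · exact Or.inl h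
      · exact Or.inr h
    · tauto
  by_cases hb : ((List.range (l.length - 5)).any
        (fun i => (PySem.List.slice l (some (i : Int)) (some ((i : Int) + 6))).all vqB)
      || (List.range (l.length - 3)).any
        (fun i => (PySem.List.slice l (some (i : Int)) (some ((i : Int) + 4))).all nvB)) = true
  · rw [if_pos hb]
    rw [Bool.or_eq_true, badV_iff, badC_iff] at hb
    exact hwin.mpr hb
  · rw [if_neg hb]
    rw [Bool.or_eq_true, badV_iff, badC_iff] at hb
    push Not at hb
    rcases goA_zero_or_one l 0 0 with h0 | h1
    · exact absurd (hwin.mp h0) (by tauto)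
    · exact h1
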